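-- pv_equiv track=rewrite | github.com/YegyKhabby/task_distribution_app | tools/deskbird_report.py | active_schedule_rows
-- ===== SOURCE A (Python) =====
-- def active_schedule_rows(rows, week_start_str: str) -> list:
--     filtered = [
--         r for r in rows
--         if (r.get("valid_from") or "2000-01-01") <= week_start_str
--         and (r.get("valid_until") is None or r["valid_until"] >= week_start_str)
--     ]
--     if not filtered:
--         return []
--     latest_version = max(r.get("valid_from") or "2000-01-01" for r in filtered)
--     version_rows = [r for r in filtered if (r.get("valid_from") or "2000-01-01") == latest_version]
--     result = {}
--     for row in sorted(version_rows, key=lambda r: r.get("valid_from") or "2000-01-01"):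
--         key = (row.get("person_id", ""), row["day_of_week"])
--         result[key] = row
--     return list(result.values())
-- ===== SOURCE B (Python) =====
-- def active_schedule_rows(rows, week_start_str: str) -> list:
--     best = None
--     candidates = []
--     for r in rows:
--         v = r.get("valid_from") or "2000-01-01"
--         if v <= week_start_str and (r.get("valid_until") is None or r["valid_until"] >= week_start_str):
--             if best is None or best < v:
--                 best = v
--                 candidates = [r]
--             elif v == best:
--                 candidates.append(r)
--     result = {}
--     for row in candidates:
--         result[(row.get("person_id", ""), row["day_of_week"])] = row
--     return list(result.values())
-- ===== Notes on version B (the rewrite author's own statement) =====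
-- stated objective: faster
-- what changed: Replaces A's four passes (filter list, max over it, re-filter to the latest version, stable sort + dict rebuild) by one online pass that keeps the running best version and the list of its rows (reset whenever a strictly newer version appears), followed by one dict pass over just those rows.
import Mathlib
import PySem

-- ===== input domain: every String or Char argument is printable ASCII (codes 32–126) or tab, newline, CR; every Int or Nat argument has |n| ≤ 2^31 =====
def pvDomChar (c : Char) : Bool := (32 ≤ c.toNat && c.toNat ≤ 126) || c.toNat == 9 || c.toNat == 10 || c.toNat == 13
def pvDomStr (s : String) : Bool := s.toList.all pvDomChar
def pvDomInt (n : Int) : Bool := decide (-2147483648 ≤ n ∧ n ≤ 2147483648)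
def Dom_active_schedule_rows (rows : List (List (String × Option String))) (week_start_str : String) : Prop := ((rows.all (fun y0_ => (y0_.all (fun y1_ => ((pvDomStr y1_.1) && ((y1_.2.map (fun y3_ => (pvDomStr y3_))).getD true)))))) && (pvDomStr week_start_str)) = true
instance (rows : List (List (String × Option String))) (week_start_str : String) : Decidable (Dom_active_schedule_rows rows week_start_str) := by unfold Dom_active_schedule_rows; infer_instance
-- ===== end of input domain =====

-- B replaces A's four passes (filter, max, re-filter, sort+dict rebuild) by ONE pass keeping a
-- running best version and the list of its rows (reset on a strictly newer version), then one
-- small dict pass over those rows.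

-- ===== PORT A =====
-- Python's lexicographic str comparison, stored kernel-reducibly (PySem.Chars.strLt = decide (· < ·))
def pvStrLt (s t : String) : Bool := PySem.Chars.strLt s.toList t.toList
def pvStrLe (s t : String) : Bool := !(PySem.Chars.strLt t.toList s.toList)

-- r.get("valid_from") or "2000-01-01"  (Python `or`: missing, None and "" all give the default)
def pvVF (r : List (String × Option String)) : String :=
  match (PySem.Dict.get? (PySem.Dict.mk r) "valid_from").getD none with
  | none => "2000-01-01"
  | some s => if s = "" then "2000-01-01" else s

-- the comprehension's filter condition (shared accessor; both Pythons test the same condition)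
def pvKeep (r : List (String × Option String)) (ws : String) : Bool :=
  pvStrLe (pvVF r) ws &&
  (match (PySem.Dict.get? (PySem.Dict.mk r) "valid_until").getD none with
   | none => true
   | some u => pvStrLe ws u)

-- (row.get("person_id", ""), row["day_of_week"]); the lookup via .getD none — exact where Pre_ holds (Python raises KeyError outside it)
def pvKey (r : List (String × Option String)) : Option String × Option String :=
  ((match PySem.Dict.get? (PySem.Dict.mk r) "person_id" with
    | none => some ""
    | some v => v),
   (PySem.Dict.get? (PySem.Dict.mk r) "day_of_week").getD none)

def active_schedule_rows (rows : List (List (String × Option String))) (week_start_str : String) : List (List (String × Option String)) :=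
  let filtered := rows.filter (fun r => pvKeep r week_start_str)
  if filtered = [] then []
  else
    match PySem.List.max? (filtered.map (fun r => pvVF r)) (fun v => v) with
    | none => []
    | some latest =>
      let version_rows := filtered.filter (fun r => pvVF r == latest)
      ((PySem.List.sorted version_rows (fun r => pvVF r) false).foldl
        (fun (d : PySem.Dict (Option String × Option String) (List (String × Option String))) row =>
          d.insert (pvKey row) row) (PySem.Dict.mk [])).values

-- ===== PORT B =====
-- loop body of Source B: state = (best version so far, rows of that version in input order)
def pvStep (ws : String)
    (st : Option String × List (List (String × Option String)))
    (r : List (String × Option String)) :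
    Option String × List (List (String × Option String)) :=
  if pvKeep r ws then
    let v := pvVF r
    match st.1 with
    | none => (some v, [r])
    | some b =>
      if pvStrLt b v then (some v, [r])
      else if v = b then (some b, st.2 ++ [r])
      else st
  else st

def active_schedule_rows_alt (rows : List (List (String × Option String))) (week_start_str : String) : List (List (String × Option String)) :=
  let candidates := (rows.foldl (pvStep week_start_str) (none, [])).2
  (candidates.foldl
    (fun (d : PySem.Dict (Option String × Option String) (List (String × Option String))) row =>
      d.insert (pvKey row) row) (PySem.Dict.mk [])).values

-- ===== PRECONDITION & SPEC =====
-- Pre_ excludes exactly the inputs where A raises KeyError: a row of the latest active version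
-- (it survives the date filter and no surviving row has a newer valid_from) without "day_of_week".
def Pre_active_schedule_rows (rows : List (List (String × Option String))) (week_start_str : String) : Prop :=
  ∀ r ∈ rows, pvKeep r week_start_str = true →
    (∀ r' ∈ rows, pvKeep r' week_start_str = true → pvStrLe (pvVF r') (pvVF r) = true) →
    (PySem.Dict.mk r).contains "day_of_week" = true
instance (rows : List (List (String × Option String))) (week_start_str : String) : Decidable (Pre_active_schedule_rows rows week_start_str) := by unfold Pre_active_schedule_rows; infer_instance

def pvWitness_active_schedule_rows : (List (List (String × Option String))) × String :=
  ([[("day_of_week", some "Mon"), ("valid_from", some "2020-01-01")]], "2020-06-06")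

def Spec_active_schedule_rows (rows : List (List (String × Option String))) (week_start_str : String) (out : List (List (String × Option String))) : Prop := out = active_schedule_rows_alt rows week_start_str
instance (rows : List (List (String × Option String))) (week_start_str : String) (out : List (List (String × Option String))) : Decidable (Spec_active_schedule_rows rows week_start_str out) := by unfold Spec_active_schedule_rows; infer_instance

-- ===== CLAIM (what is proved, stated in full; the proofs are below) =====
def Claim_equal_active_schedule_rows : Prop := ∀ (rows : List (List (String × Option String))) (week_start_str : String), Dom_active_schedule_rows rows week_start_str → Pre_active_schedule_rows rows week_start_str → Spec_active_schedule_rows rows week_start_str (active_schedule_rows rows week_start_str)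


-- ===== LEMMAS AND PROOFS =====

lemma pvStrLt_iff (s t : String) : pvStrLt s t = true ↔ s < t := by
  simp [pvStrLt, PySem.Chars.strLt]

lemma pvStrLt_eq_false_iff (s t : String) : pvStrLt s t = false ↔ ¬ s < t := by
  simp [pvStrLt, PySem.Chars.strLt]

-- max of a nonempty list of strings, as A's `max` computes it
def pvMaxStr (vs : List String) : Option String :=
  match vs with
  | [] => none
  | v :: t => some (t.foldl max v)

def pvBest (rows : List (List (String × Option String))) (ws : String) : Option String :=
  pvMaxStr ((rows.filter (fun r => pvKeep r ws)).map pvVF)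

lemma pvMaxStr_eq_none_iff (vs : List String) : pvMaxStr vs = none ↔ vs = [] := by
  cases vs <;> simp [pvMaxStr]

lemma pvMaxStr_append (vs : List String) (v : String) :
    pvMaxStr (vs ++ [v]) = some ((pvMaxStr vs).elim v (fun b => max b v)) := by
  cases vs <;> simp [pvMaxStr, List.foldl_append]

lemma foldl_max_init_le (t : List String) (a : String) : a ≤ t.foldl max a := by
  induction t generalizing a with
  | nil => exact le_refl a
  | cons b t ih => exact le_trans (le_max_left a b) (ih (max a b))

lemma mem_le_foldl_max (t : List String) (a : String) : ∀ v ∈ t, v ≤ t.foldl max a := by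
  induction t generalizing a with
  | nil => simp
  | cons c t' ih =>
    intro v hv
    rcases List.mem_cons.mp hv with rfl | hv
    · exact le_trans (le_max_right a v) (foldl_max_init_le t' (max a v))
    · exact ih (max a c) v hv

lemma le_pvMaxStr (vs : List String) (b : String) (h : pvMaxStr vs = some b) :
    ∀ v ∈ vs, v ≤ b := by
  cases vs with
  | nil => exact absurd h (by simp [pvMaxStr])
  | cons a t =>
    simp only [pvMaxStr, Option.some.injEq] at h
    subst h
    intro v hv
    rcases List.mem_cons.mp hv with rfl | hv
    · exact foldl_max_init_le t v
    · exact mem_le_foldl_max t a v hv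

lemma pvLoop (ws : String) (rows : List (List (String × Option String))) :
    rows.foldl (pvStep ws) (none, []) =
      (pvBest rows ws,
       (rows.filter (fun r => pvKeep r ws)).filter
         (fun r => pvVF r == (pvBest rows ws).getD "")) := by
  induction rows using List.reverseRecOn with
  | nil => rfl
  | append_singleton l x ih =>
    rw [List.foldl_append, List.foldl_cons, List.foldl_nil, ih]
    by_cases hk : pvKeep x ws = true
    · have hfil : (l ++ [x]).filter (fun r => pvKeep r ws)
          = l.filter (fun r => pvKeep r ws) ++ [x] := by
        simp [List.filter_append, hk]
      have hbest : pvBest (l ++ [x]) ws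
          = some ((pvBest l ws).elim (pvVF x) (fun b => max b (pvVF x))) := by
        simp only [pvBest, hfil, List.map_append, List.map_cons, List.map_nil, pvMaxStr_append]
      cases hB : pvBest l ws with
      | none =>
        have hnil : l.filter (fun r => pvKeep r ws) = [] := by
          have := (pvMaxStr_eq_none_iff _).mp hB
          exact List.map_eq_nil_iff.mp this
        simp [pvStep, hk, hbest, hB, hfil, hnil]
      | some b =>
        rcases lt_trichotomy b (pvVF x) with hlt | heq | hgt
        · -- strictly newer version: reset
          have hmax : max b (pvVF x) = pvVF x := max_eq_right hlt.le
          have hnone : (l.filter (fun r => pvKeep r ws)).filter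
              (fun r => pvVF r == pvVF x) = [] := by
            apply List.filter_eq_nil_iff.mpr
            intro r hr
            have hmem : pvVF r ∈ (l.filter (fun r => pvKeep r ws)).map pvVF :=
              List.mem_map_of_mem hr
            have hle : pvVF r ≤ b := le_pvMaxStr _ b hB (pvVF r) hmem
            simp only [beq_iff_eq]
            exact fun hEq => absurd (hEq ▸ hle) (not_le.mpr hlt)
          simp [pvStep, hk, hbest, hB, hfil, (pvStrLt_iff b (pvVF x)).mpr hlt,
            List.filter_append, hnone, hmax]
        · -- same version: last-wins insert into the existing dict
          have hstrlt : pvStrLt b (pvVF x) = false := by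
            rw [pvStrLt_eq_false_iff, ← heq]; exact lt_irrefl b
          have hmax : max b (pvVF x) = b := by rw [← heq]; exact max_self b
          have heq' : pvVF x = b := heq.symm
          have hbb : pvStrLt b b = false := by
            rw [pvStrLt_eq_false_iff]; exact lt_irrefl b
          simp [pvStep, hk, hbest, hB, hfil, heq', hbb, List.filter_append]
        · -- older version: skip
          have hmax : max b (pvVF x) = b := max_eq_left hgt.le
          have hstrlt : pvStrLt b (pvVF x) = false := by
            rw [pvStrLt_eq_false_iff]; exact not_lt.mpr hgt.le
          have hne : ¬ pvVF x = b := ne_of_lt hgt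
          simp [pvStep, hk, hbest, hB, hfil, hstrlt, List.filter_append, hmax, hne]
    · have hk' : pvKeep x ws = false := by simpa using hk
      have hfil : (l ++ [x]).filter (fun r => pvKeep r ws)
          = l.filter (fun r => pvKeep r ws) := by
        simp [List.filter_append, hk']
      simp [pvStep, hk', pvBest, hfil]

lemma pvPairwise (xs : List (List (String × Option String))) (lat : String) :
    (xs.filter (fun r => pvVF r == lat)).Pairwise (fun a b => pvVF a ≤ pvVF b) := by
  apply List.pairwise_of_forall_mem_list
  intro a ha b hb
  have ha' := (List.mem_filter.mp ha).2
  have hb' := (List.mem_filter.mp hb).2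
  simp only [beq_iff_eq] at ha' hb'
  rw [ha', hb']

-- ===== VERDICT (by name: the statement is the Claim_ definition above) =====
theorem active_schedule_rows_spec : Claim_equal_active_schedule_rows := by
  intro rows ws _ _
  unfold Spec_active_schedule_rows active_schedule_rows active_schedule_rows_alt
  rw [pvLoop]
  cases hf : rows.filter (fun r => pvKeep r ws) with
  | nil =>
    simp [hf, pvBest, pvMaxStr]
  | cons f t =>
    have hmax : PySem.List.max? ((f :: t).map (fun r => pvVF r)) (fun v => v)
        = pvBest rows ws := by
      simp only [List.map_cons, PySem.List.max?_id_cons, pvBest, hf, pvMaxStr, List.map_cons]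
    have hBest : pvBest rows ws = some ((t.map pvVF).foldl max (pvVF f)) := by
      simp [pvBest, hf, pvMaxStr]
    simp only [hmax, hBest]
    have hsorted : PySem.List.sorted
        ((f :: t).filter (fun r => pvVF r == (t.map pvVF).foldl max (pvVF f)))
        (fun r => pvVF r) false
        = (f :: t).filter (fun r => pvVF r == (t.map pvVF).foldl max (pvVF f)) :=
      PySem.List.sorted_eq_self_of_pairwise _ _ (pvPairwise _ _)
    simp [hsorted]
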